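-- pv_equiv track=rewrite | github.com/marishkasept/Python-basic-Doom-Patrol | my_homeworks/lab 3.py | add_zeros
-- ===== SOURCE A (Python) =====
-- def remove_zeros(a):
--     while a[0] == 0 and len(a) > 1:
--         a.pop(0)
--     return a
--
-- def regulation(a, b):
--     a = remove_zeros(a)
--     b = remove_zeros(b)
--     if len(a) == len(b):
--         i = 0
--         while i < len(a)-1 and a[i] == b[i]:
--             i += 1
--         if a[i] < b[i]:
--             return 0
--         else:
--             return 1
--     elif len(a) < len(b):
--         return 0
--     return 1
--
-- def add_zeros(a, b):
--     if regulation(a, b) == 1: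
--         while len(b) != len(a):
--             b = [0] + b
--     else:
--         while len(a) != len(b):
--             a = [0] + a
--     return a, b
-- ===== SOURCE B (Python) =====
-- def _strip(a):
--     # remove leading zeros in place, keeping at least one element
--     i = 0
--     while i < len(a) - 1 and a[i] == 0:
--         i += 1
--     del a[:i]
--     return a
--
-- def add_zeros(a, b):
--     a = _strip(a)
--     b = _strip(b)
--     d = len(a) - len(b)
--     if d > 0:
--         b = [0] * d + b
--     elif d < 0:
--         a = [0] * (-d) + a
--     return a, b
-- ===== Notes on version B (the rewrite author's own statement) =====
-- stated objective: simpler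
-- what changed: B strips leading zeros by scanning for the first nonzero position and dropping a prefix, then pads the shorter list with one [0]*diff slice based on the length difference, dropping A's element-by-element padding loop and the whole value-comparison routine 'regulation' (whose comparison result never affects the return value).
import Mathlib
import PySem

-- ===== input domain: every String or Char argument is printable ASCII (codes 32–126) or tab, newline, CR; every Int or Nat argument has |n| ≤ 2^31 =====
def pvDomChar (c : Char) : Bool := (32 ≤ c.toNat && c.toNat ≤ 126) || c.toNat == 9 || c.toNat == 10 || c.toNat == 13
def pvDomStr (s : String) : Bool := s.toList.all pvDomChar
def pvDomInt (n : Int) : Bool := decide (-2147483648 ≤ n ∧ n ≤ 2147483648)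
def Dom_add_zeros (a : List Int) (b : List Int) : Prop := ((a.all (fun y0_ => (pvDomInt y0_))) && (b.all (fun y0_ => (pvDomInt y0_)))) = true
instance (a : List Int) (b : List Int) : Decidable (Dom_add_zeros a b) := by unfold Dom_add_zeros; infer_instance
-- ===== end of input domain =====

-- B strips leading zeros by a prefix scan + drop and pads with one replicate slice,
-- dropping A's per-element loops and the dead value-comparison; objective: simpler.
-- (A mutates its arguments in place while stripping; the equivalence is about the return value.)


-- ===== PORT A =====
-- while a[0] == 0 and len(a) > 1: a.pop(0)   (on [] Python raises IndexError; excluded by Pre_)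
def remove_zeros (a : List Int) : List Int :=
  match a with
  | [] => []                                   -- Python raises here; outside Pre_
  | x :: rest => if x = 0 ∧ rest ≠ [] then remove_zeros rest else x :: rest

-- while i < len(a)-1 and a[i] == b[i]: i += 1   (indices are in range at every access)
def regLoop (a : List Int) (b : List Int) (i : Nat) : Nat :=
  if i < a.length - 1 ∧ a.getD i 0 = b.getD i 0 then regLoop a b (i + 1) else i
termination_by a.length - i
decreasing_by omega

def regulation (a : List Int) (b : List Int) : Int :=
  let a := remove_zeros a
  let b := remove_zeros b
  if a.length = b.length then
    let i := regLoop a b 0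
    if a.getD i 0 < b.getD i 0 then 0 else 1
  else if a.length < b.length then 0 else 1

-- while len(b) != len(a): b = [0] + b   -- fuel = target length (the loop only ever grows b toward it)
def padLoop (fuel : Nat) (tgt : Nat) (b : List Int) : List Int :=
  match fuel with
  | 0 => b
  | f + 1 => if b.length ≠ tgt then padLoop f tgt (0 :: b) else b

def add_zeros (a : List Int) (b : List Int) : List Int × List Int :=
  -- Python's regulation strips a and b IN PLACE via remove_zeros; we model that by
  -- rebinding a and b to their stripped values after the call.
  let r := regulation a b
  let a := remove_zeros a
  let b := remove_zeros b
  if r = 1 then (a, padLoop a.length a.length b)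
  else (padLoop b.length b.length a, b)

-- ===== PORT B =====
-- i = 0; while i < len(a)-1 and a[i] == 0: i += 1   (index always in range)
def stripIdx (a : List Int) (i : Nat) : Nat :=
  if i < a.length - 1 ∧ a.getD i 0 = 0 then stripIdx a (i + 1) else i
termination_by a.length - i
decreasing_by omega

def add_zeros_alt (a : List Int) (b : List Int) : List Int × List Int :=
  let a := a.drop (stripIdx a 0)          -- del a[:i]
  let b := b.drop (stripIdx b 0)
  let d : Int := (a.length : Int) - b.length
  if d > 0 then (a, List.replicate d.toNat 0 ++ b)
  else if d < 0 then (List.replicate (-d).toNat 0 ++ a, b)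
  else (a, b)

-- ===== PRECONDITION & SPEC =====
-- Pre_ excludes exactly the inputs on which A raises IndexError: an empty a or b.
def Pre_add_zeros (a : List Int) (b : List Int) : Prop := a ≠ [] ∧ b ≠ []
instance (a : List Int) (b : List Int) : Decidable (Pre_add_zeros a b) := by
  unfold Pre_add_zeros; infer_instance

def pvWitness_add_zeros : List Int × List Int := ([0, 3], [1, 2, 5])

def Spec_add_zeros (a : List Int) (b : List Int) (out : List Int × List Int) : Prop := out = add_zeros_alt a b
instance (a : List Int) (b : List Int) (out : List Int × List Int) : Decidable (Spec_add_zeros a b out) := by unfold Spec_add_zeros; infer_instance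

-- ===== CLAIM (what is proved, stated in full; the proofs are below) =====
def Claim_equal_add_zeros : Prop := ∀ (a : List Int) (b : List Int), Dom_add_zeros a b → Pre_add_zeros a b → Spec_add_zeros a b (add_zeros a b)

-- ===== LEMMAS AND PROOFS =====

-- stripping never empties a nonempty list
theorem remove_zeros_ne_nil (a : List Int) (h : a ≠ []) : remove_zeros a ≠ [] := by
  induction a with
  | nil => exact absurd rfl h
  | cons x rest ih =>
    rw [remove_zeros]
    split
    · exact ih (by rename_i hc; exact hc.2)
    · simp

-- B's prefix drop computes A's in-place strip
theorem drop_stripIdx (a : List Int) (i : Nat) :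
    a.drop (stripIdx a i) = remove_zeros (a.drop i) := by
  rw [stripIdx]
  split
  · rename_i hc
    have hlt : i < a.length := by omega
    have hd : a.drop i = a.getD i 0 :: a.drop (i + 1) := by
      rw [List.getD_eq_getElem _ _ hlt]
      exact (List.getElem_cons_drop hlt).symm
    rw [drop_stripIdx a (i + 1), hd, hc.2, remove_zeros]
    have : a.drop (i + 1) ≠ [] := by
      intro h
      have := List.drop_eq_nil_iff.mp h
      omega
    simp [this]
  · rename_i hc
    by_cases hlt : i < a.length
    · have hd : a.drop i = a.getD i 0 :: a.drop (i + 1) := by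
        rw [List.getD_eq_getElem _ _ hlt]
        exact (List.getElem_cons_drop hlt).symm
      rw [hd, remove_zeros]
      by_cases hz : a.getD i 0 = 0
      · have hlen : a.drop (i + 1) = [] := by
          apply List.drop_eq_nil_iff.mpr; omega
        rw [if_neg (by simp [hlen])]
      · rw [if_neg (fun h => hz h.1)]
    · have : a.drop i = [] := List.drop_eq_nil_iff.mpr (by omega)
      rw [this, remove_zeros]
termination_by a.length - i
decreasing_by omega

-- padLoop with enough fuel = left-pad with zeros to the target length
theorem padLoop_eq (fuel tgt : Nat) (b : List Int)
    (hle : b.length ≤ tgt) (hfuel : tgt ≤ b.length + fuel) :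
    padLoop fuel tgt b = List.replicate (tgt - b.length) 0 ++ b := by
  induction fuel generalizing b with
  | zero =>
    have : b.length = tgt := by omega
    simp [padLoop, this]
  | succ f ih =>
    rw [padLoop]
    by_cases h : b.length = tgt
    · simp [h]
    · simp only [h, ne_eq, not_false_eq_true, if_true]
      rw [ih (0 :: b) (by simp; omega) (by simp; omega)]
      have : tgt - b.length = (tgt - (0 :: b).length) + 1 := by simp; omega
      rw [this, List.replicate_succ', List.append_assoc]
      simp

-- regulation's value is 1 only when the stripped a is at least as long as the stripped b,
-- and 0 only in the opposite case
theorem regulation_length (a b : List Int) :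
    (regulation a b = 1 → (remove_zeros b).length ≤ (remove_zeros a).length) ∧
    (regulation a b ≠ 1 → (remove_zeros a).length ≤ (remove_zeros b).length) := by
  have h : regulation a b =
      (if (remove_zeros a).length = (remove_zeros b).length then
        (if (remove_zeros a).getD (regLoop (remove_zeros a) (remove_zeros b) 0) 0 <
            (remove_zeros b).getD (regLoop (remove_zeros a) (remove_zeros b) 0) 0 then (0 : Int) else 1)
      else if (remove_zeros a).length < (remove_zeros b).length then 0 else 1) := rfl
  rw [h]
  split_ifs with h1 h2 h3
  · exact ⟨fun _ => by omega, fun _ => by omega⟩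
  · exact ⟨fun _ => by omega, fun _ => by omega⟩
  · exact ⟨fun hx => absurd hx (by decide), fun _ => by omega⟩
  · exact ⟨fun _ => by omega, fun hx => absurd rfl hx⟩

theorem add_zeros_eq (a b : List Int) (ha : a ≠ []) (hb : b ≠ []) :
    add_zeros a b = add_zeros_alt a b := by
  have hsa := drop_stripIdx a 0
  have hsb := drop_stripIdx b 0
  simp only [List.drop_zero] at hsa hsb
  have hna : remove_zeros a ≠ [] := remove_zeros_ne_nil a ha
  have hnb : remove_zeros b ≠ [] := remove_zeros_ne_nil b hb
  have hla : 0 < (remove_zeros a).length := List.length_pos_of_ne_nil hna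
  have hlb : 0 < (remove_zeros b).length := List.length_pos_of_ne_nil hnb
  have hreg := regulation_length a b
  have hA : add_zeros a b =
      (if regulation a b = 1 then
        (remove_zeros a, padLoop (remove_zeros a).length (remove_zeros a).length (remove_zeros b))
      else
        (padLoop (remove_zeros b).length (remove_zeros b).length (remove_zeros a), remove_zeros b)) := rfl
  have hB : add_zeros_alt a b =
      (if ((remove_zeros a).length : Int) - (remove_zeros b).length > 0 then
        (remove_zeros a,
          List.replicate (((remove_zeros a).length : Int) - (remove_zeros b).length).toNat 0 ++ remove_zeros b)
      else if ((remove_zeros a).length : Int) - (remove_zeros b).length < 0 then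
        (List.replicate (-(((remove_zeros a).length : Int) - (remove_zeros b).length)).toNat 0 ++ remove_zeros a,
          remove_zeros b)
      else (remove_zeros a, remove_zeros b)) := by
    simp only [add_zeros_alt, hsa, hsb]
  rw [hA, hB]
  by_cases hr : regulation a b = 1
  · have hle : (remove_zeros b).length ≤ (remove_zeros a).length := hreg.1 hr
    rw [if_pos hr, padLoop_eq _ _ _ hle (by omega)]
    by_cases hd : (remove_zeros b).length < (remove_zeros a).length
    · rw [if_pos (by push_cast; omega)]
      have ht : (((remove_zeros a).length : Int) - (remove_zeros b).length).toNat =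
          (remove_zeros a).length - (remove_zeros b).length := by omega
      rw [ht]
    · have heq : (remove_zeros a).length = (remove_zeros b).length := by omega
      rw [if_neg (by push_cast; omega), if_neg (by push_cast; omega)]
      have h0 : (remove_zeros a).length - (remove_zeros b).length = 0 := by omega
      rw [h0]
      simp
  · have hle : (remove_zeros a).length ≤ (remove_zeros b).length := hreg.2 hr
    rw [if_neg hr, padLoop_eq _ _ _ hle (by omega)]
    by_cases hd : (remove_zeros a).length < (remove_zeros b).length
    · rw [if_neg (by push_cast; omega), if_pos (by push_cast; omega)]
      have ht : (-((((remove_zeros a).length : Int)) - (remove_zeros b).length)).toNat =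
          (remove_zeros b).length - (remove_zeros a).length := by omega
      rw [ht]
    · have heq : (remove_zeros a).length = (remove_zeros b).length := by omega
      rw [if_neg (by push_cast; omega), if_neg (by push_cast; omega)]
      have h0 : (remove_zeros b).length - (remove_zeros a).length = 0 := by omega
      rw [h0]
      simp

-- ===== VERDICT (by name: the statement is the Claim_ definition above) =====
theorem add_zeros_spec : Claim_equal_add_zeros := by
  intro a b _ hpre
  unfold Spec_add_zeros
  exact add_zeros_eq a b hpre.1 hpre.2
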